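-- pv_equiv track=rewrite | github.com/kmackinnon/Energy-Forecaster | Django/wsgi/app/views.py | interleave_weather
-- ===== SOURCE A (Python) =====
-- def interleave_weather(dates,weather_raw):
--   weather_formatted = []
--   for x in dates:
--     date_found = 0
--     for y in weather_raw:
--       if x == y[0]:
--         weather_formatted.append(y[1])
--         date_found = 1
--       #  break
--     if date_found == 0:
--       weather_formatted.append('null')
--
--   return weather_formatted
-- ===== SOURCE B (Python) =====
-- def interleave_weather(dates, weather_raw):
--     by_date = {}
--     for d, v in weather_raw:
--         by_date.setdefault(d, []).append(v)
--     out = []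
--     for x in dates:
--         out.extend(by_date.get(x, ['null']))
--     return out
-- ===== Notes on version B (the rewrite author's own statement) =====
-- stated objective: faster
-- what changed: Replaces the inner scan of weather_raw per date with a dict date->list of values built once, then a single pass over dates extending with the grouped values or ['null'].
import Mathlib
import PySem

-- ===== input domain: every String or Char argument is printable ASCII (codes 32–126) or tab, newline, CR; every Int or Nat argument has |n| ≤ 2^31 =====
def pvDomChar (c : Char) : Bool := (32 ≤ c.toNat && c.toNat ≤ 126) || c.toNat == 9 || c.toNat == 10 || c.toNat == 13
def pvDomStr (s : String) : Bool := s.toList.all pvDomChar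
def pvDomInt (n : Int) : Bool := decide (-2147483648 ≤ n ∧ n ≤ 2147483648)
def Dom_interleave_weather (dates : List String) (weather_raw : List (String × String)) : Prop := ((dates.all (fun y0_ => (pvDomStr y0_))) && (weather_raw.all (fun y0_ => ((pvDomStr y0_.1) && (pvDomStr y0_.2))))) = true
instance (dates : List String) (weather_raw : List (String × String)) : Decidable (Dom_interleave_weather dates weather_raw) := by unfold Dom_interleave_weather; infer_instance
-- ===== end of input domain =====

-- B replaces A's per-date inner scan of weather_raw by a dict date→values built once, then one pass over dates (faster: O(n+m) vs O(n·m)).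

-- ===== PORT A =====
-- inner 'for y in weather_raw' loop: state (weather_formatted, date_found)
def interleave_weather (dates : List String) (weather_raw : List (String × String)) : List String :=
  (dates.foldl (fun wf x =>
    let r := weather_raw.foldl
      (fun (p : List String × Int) y => if x == y.1 then (p.1 ++ [y.2], 1) else p)
      (wf, 0)
    if r.2 == 0 then r.1 ++ ["null"] else r.1) [])

-- ===== PORT B =====
-- by_date.setdefault(d, []).append(v)  ≡  overwrite-insert of the extended list (same position/order semantics)
def interleave_weather_alt (dates : List String) (weather_raw : List (String × String)) : List String :=
  let by_date : PySem.Dict String (List String) :=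
    weather_raw.foldl (fun d p => d.insert p.1 (d.getD p.1 [] ++ [p.2])) PySem.Dict.empty
  dates.foldl (fun out x => out ++ by_date.getD x ["null"]) []

-- ===== PRECONDITION & SPEC =====
def Spec_interleave_weather (dates : List String) (weather_raw : List (String × String)) (out : List String) : Prop := out = interleave_weather_alt dates weather_raw
instance (dates : List String) (weather_raw : List (String × String)) (out : List String) : Decidable (Spec_interleave_weather dates weather_raw out) := by unfold Spec_interleave_weather; infer_instance

-- ===== CLAIM (what is proved, stated in full; the proofs are below) =====
def Claim_equal_interleave_weather : Prop := ∀ (dates : List String) (weather_raw : List (String × String)), Dom_interleave_weather dates weather_raw → Spec_interleave_weather dates weather_raw (interleave_weather dates weather_raw)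

-- ===== LEMMAS AND PROOFS =====

-- the values matching date x, in weather_raw order
def pvMatches (weather_raw : List (String × String)) (x : String) : List String :=
  (weather_raw.filter (fun y => y.1 == x)).map Prod.snd

-- A's inner loop
theorem innerA_eq (x : String) (l : List (String × String)) :
    ∀ (acc : List String) (f : Int),
      l.foldl (fun (p : List String × Int) y => if x == y.1 then (p.1 ++ [y.2], 1) else p) (acc, f)
        = (acc ++ pvMatches l x, if pvMatches l x = [] then f else 1) := by
  induction l with
  | nil => intro acc f; simp [pvMatches]
  | cons y t ih =>
    intro acc f
    rw [List.foldl_cons]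
    by_cases h : x == y.1
    · rw [if_pos h, ih]
      have h' : (y.1 == x) = true := by
        simpa [beq_iff_eq] using (beq_iff_eq.mp h).symm
      have hm : pvMatches (y :: t) x = y.2 :: pvMatches t x := by
        simp [pvMatches, List.filter_cons, h']
      rw [hm]
      by_cases ht : pvMatches t x = [] <;> simp [ht]
    · rw [if_neg h, ih]
      have h' : (y.1 == x) = false := by
        simp only [beq_eq_false_iff_ne, ne_eq]
        intro hb; exact h (by simp [beq_iff_eq, hb])
      have hm : pvMatches (y :: t) x = pvMatches t x := by
        simp [pvMatches, List.filter_cons, h']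
      rw [hm]

-- B's dict build: get? of the built dict
theorem build_get? (x : String) (l : List (String × String)) :
    ∀ (d : PySem.Dict String (List String)),
      (l.foldl (fun d p => d.insert p.1 (d.getD p.1 [] ++ [p.2])) d).get? x
        = if pvMatches l x = [] then d.get? x else some (d.getD x [] ++ pvMatches l x) := by
  induction l with
  | nil => intro d; simp [pvMatches]
  | cons p t ih =>
    intro d
    rw [List.foldl_cons, ih]
    by_cases h : p.1 = x
    · subst h
      have hg : (d.insert p.1 (d.getD p.1 [] ++ [p.2])).get? p.1
          = some (d.getD p.1 [] ++ [p.2]) := PySem.Dict.get?_insert_self _ _ _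
      have hgd : (d.insert p.1 (d.getD p.1 [] ++ [p.2])).getD p.1 []
          = d.getD p.1 [] ++ [p.2] := by rw [PySem.Dict.getD_insert]; simp
      have hm : pvMatches (p :: t) p.1 = p.2 :: pvMatches t p.1 := by
        simp [pvMatches, List.filter_cons]
      rw [hm, hg, hgd]
      by_cases ht : pvMatches t p.1 = [] <;> simp [ht]
    · have hne : ¬ (x = p.1) := fun hx => h hx.symm
      have hg : (d.insert p.1 (d.getD p.1 [] ++ [p.2])).get? x = d.get? x := by
        rw [PySem.Dict.get?_insert, if_neg hne]
      have hgd : (d.insert p.1 (d.getD p.1 [] ++ [p.2])).getD x [] = d.getD x [] := by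
        rw [PySem.Dict.getD_insert, if_neg hne]
      have hm : pvMatches (p :: t) x = pvMatches t x := by
        simp [pvMatches, List.filter_cons, h]
      rw [hm, hg, hgd]

-- per-date chunk both programs append
def pvChunk (weather_raw : List (String × String)) (x : String) : List String :=
  if pvMatches weather_raw x = [] then ["null"] else pvMatches weather_raw x

theorem getD_build (x : String) (l : List (String × String)) :
    (l.foldl (fun d p => d.insert p.1 (d.getD p.1 [] ++ [p.2]))
      (PySem.Dict.empty : PySem.Dict String (List String))).getD x ["null"] = pvChunk l x := by
  rw [PySem.Dict.getD_eq_get?_getD, build_get?]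
  by_cases h : pvMatches l x = [] <;> simp [h, pvChunk, PySem.Dict.get?_empty]

theorem foldlA_eq (weather_raw : List (String × String)) (dates : List String) :
    ∀ (wf : List String),
      dates.foldl (fun wf x =>
        let r := weather_raw.foldl
          (fun (p : List String × Int) y => if x == y.1 then (p.1 ++ [y.2], 1) else p) (wf, 0)
        if r.2 == 0 then r.1 ++ ["null"] else r.1) wf
      = wf ++ dates.flatMap (pvChunk weather_raw) := by
  induction dates with
  | nil => intro wf; simp
  | cons x t ih =>
    intro wf
    have hstep : ∀ (w : List String) (z : String),
        (let r := weather_raw.foldl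
            (fun (p : List String × Int) y => if z == y.1 then (p.1 ++ [y.2], 1) else p) (w, 0)
         if r.2 == 0 then r.1 ++ ["null"] else r.1) = w ++ pvChunk weather_raw z := by
      intro w z
      simp only [innerA_eq]
      by_cases h : pvMatches weather_raw z = [] <;> simp [h, pvChunk]
    rw [List.foldl_cons, hstep, ih, List.flatMap_cons, List.append_assoc]

theorem foldlB_eq (weather_raw : List (String × String)) (dates : List String) :
    ∀ (out : List String),
      dates.foldl (fun out x =>
        out ++ (weather_raw.foldl (fun d p => d.insert p.1 (d.getD p.1 [] ++ [p.2]))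
          (PySem.Dict.empty : PySem.Dict String (List String))).getD x ["null"]) out
      = out ++ dates.flatMap (pvChunk weather_raw) := by
  induction dates with
  | nil => intro out; simp
  | cons x t ih =>
    intro out
    rw [List.foldl_cons, ih, getD_build, List.flatMap_cons, List.append_assoc]

-- ===== VERDICT (by name: the statement is the Claim_ definition above) =====
theorem interleave_weather_spec : Claim_equal_interleave_weather := by
  intro dates weather_raw _
  unfold Spec_interleave_weather interleave_weather interleave_weather_alt
  rw [foldlA_eq, foldlB_eq]
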